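-- pv_equiv track=rewrite | github.com/LucaBelmonteAmenta/Practica_IA | Practica/Busqueda Local/Hnefatafl.py | actions
-- ===== SOURCE A (Python) =====
-- ubicacionesEnemigos = (
--     (0,0),
--     (0,1),
--     (0,4),
--     (1,4),
--     (2,0),
--     (3,1),
--     (3,6),
--     (4,0),
--     (6,3),
--     (6,5),
-- )
--
-- def actions(estado):
--
--     acciones_posibles = []
--
--     Movimientos = (
--         (-1, 0),  # arriba
--         (1, 0),  # abajo
--         (0, -1),  # izquierda
--         (0, 1),  # derecha
--     )
--
--     for movimiento in Movimientos:
--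
--         nuevoEstado = list(estado)
--         nuevoEstado[0] += movimiento[0]
--         nuevoEstado[1] += movimiento[1]
--
--         sobreElEnemigo = nuevoEstado in ubicacionesEnemigos
--
--         adjacenteAlEnemigo = False
--
--         dentroDelTablero = ( (0 <= nuevoEstado[0] <= 6) and (0 <= nuevoEstado[1] <= 6))
--
--         for movimientoVirtual in Movimientos:
--
--             EstadoVirtual = list(nuevoEstado)
--             EstadoVirtual[0] += movimientoVirtual[0]
--             EstadoVirtual[1] += movimientoVirtual[1]
--             EstadoVirtual = tuple(EstadoVirtual)
--
--             if (EstadoVirtual in ubicacionesEnemigos):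
--                 adjacenteAlEnemigo = True
--
--         if (not sobreElEnemigo) and (not adjacenteAlEnemigo) and dentroDelTablero:
--             acciones_posibles.append(tuple(nuevoEstado))
--
--     return acciones_posibles
-- ===== SOURCE B (Python) =====
-- ubicacionesEnemigos = (
--     (0,0),
--     (0,1),
--     (0,4),
--     (1,4),
--     (2,0),
--     (3,1),
--     (3,6),
--     (4,0),
--     (6,3),
--     (6,5),
-- )
--
-- _MOVS = ((-1, 0), (1, 0), (0, -1), (0, 1))
--
-- # Precomputed once: every cell orthogonally adjacent to an enemy.
-- _DANGER = {(ex + dx, ey + dy) for (ex, ey) in ubicacionesEnemigos for (dx, dy) in _MOVS}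
--
-- def actions(estado):
--     x, y = estado
--     return [(x + dx, y + dy) for (dx, dy) in _MOVS
--             if 0 <= x + dx <= 6 and 0 <= y + dy <= 6 and (x + dx, y + dy) not in _DANGER]
-- ===== Notes on version B (the rewrite author's own statement) =====
-- stated objective: simpler
-- what changed: B precomputes a constant 'danger' set of all cells adjacent to an enemy once at module level and returns a single comprehension over the 4 moves, eliminating A's inner 4-iteration enemy scan per move and the always-False list-vs-tuple 'sobreElEnemigo' test.
import Mathlib
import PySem

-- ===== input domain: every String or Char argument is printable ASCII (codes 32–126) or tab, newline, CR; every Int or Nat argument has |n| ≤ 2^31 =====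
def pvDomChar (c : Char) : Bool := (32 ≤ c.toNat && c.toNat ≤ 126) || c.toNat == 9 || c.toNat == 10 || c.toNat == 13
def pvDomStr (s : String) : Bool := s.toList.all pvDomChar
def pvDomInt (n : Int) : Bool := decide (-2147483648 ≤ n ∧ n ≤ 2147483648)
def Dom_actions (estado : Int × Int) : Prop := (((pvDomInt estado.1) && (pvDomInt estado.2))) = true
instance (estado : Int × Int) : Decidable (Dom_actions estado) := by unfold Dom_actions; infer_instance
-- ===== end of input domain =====

-- B precomputes the constant set of cells adjacent to an enemy once at module level and
-- filters the 4 moves in one comprehension (objective: simpler); A's 'sobreElEnemigo'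
-- test compares a Python list with tuples and is always False, so B omits it.

-- ===== PORT A =====
def ubicacionesEnemigos : List (Int × Int) :=
  [(0,0),(0,1),(0,4),(1,4),(2,0),(3,1),(3,6),(4,0),(6,3),(6,5)]

def actions (estado : Int × Int) : List (Int × Int) :=
  let Movimientos : List (Int × Int) := [(-1,0),(1,0),(0,-1),(0,1)]
  Movimientos.foldl (fun acciones movimiento =>
    let nuevoEstado : Int × Int := (estado.1 + movimiento.1, estado.2 + movimiento.2)
    -- Python: 'nuevoEstado in ubicacionesEnemigos' compares a LIST with tuples: always False
    let sobreElEnemigo : Bool := false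
    let adjacenteAlEnemigo : Bool := Movimientos.foldl (fun adj mv =>
      if (nuevoEstado.1 + mv.1, nuevoEstado.2 + mv.2) ∈ ubicacionesEnemigos then true else adj)
      false
    let dentroDelTablero : Bool :=
      decide ((0 ≤ nuevoEstado.1 ∧ nuevoEstado.1 ≤ 6) ∧ (0 ≤ nuevoEstado.2 ∧ nuevoEstado.2 ≤ 6))
    if (!sobreElEnemigo && !adjacenteAlEnemigo && dentroDelTablero) then
      acciones ++ [nuevoEstado]
    else acciones) []

-- ===== PORT B =====
def pvMovs : List (Int × Int) := [(-1,0),(1,0),(0,-1),(0,1)]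

-- module-level constant of Source B: every cell orthogonally adjacent to an enemy
def pvDanger : PySem.Set (Int × Int) :=
  PySem.Set.ofList (ubicacionesEnemigos.flatMap fun e => pvMovs.map fun m => (e.1 + m.1, e.2 + m.2))

def actions_alt (estado : Int × Int) : List (Int × Int) :=
  pvMovs.filterMap fun m =>
    let n : Int × Int := (estado.1 + m.1, estado.2 + m.2)
    if (0 ≤ n.1 ∧ n.1 ≤ 6) ∧ (0 ≤ n.2 ∧ n.2 ≤ 6) ∧ ¬ PySem.Set.contains pvDanger n = true then
      some n
    else none

-- ===== PRECONDITION & SPEC =====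
def Spec_actions (estado : Int × Int) (out : List (Int × Int)) : Prop := out = actions_alt estado
instance (estado : Int × Int) (out : List (Int × Int)) : Decidable (Spec_actions estado out) := by unfold Spec_actions; infer_instance

-- ===== CLAIM (what is proved, stated in full; the proofs are below) =====
def Claim_equal_actions : Prop := ∀ (estado : Int × Int), Dom_actions estado → Spec_actions estado (actions estado)

-- ===== LEMMAS AND PROOFS =====

-- A's inner 'set the flag if a neighbour is an enemy' loop is a Boolean 'any'
theorem foldl_if_true {α : Type} (l : List α) (p : α → Prop) [DecidablePred p] (b : Bool) :
    l.foldl (fun adj mv => if p mv then true else adj) b = (b || l.any (fun x => decide (p x))) := by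
  induction l generalizing b with
  | nil => simp
  | cons h t ih =>
    rw [List.foldl_cons, ih]
    by_cases hp : p h <;> simp [hp]

theorem neg_mem_pvMovs : ∀ mv ∈ pvMovs, (-mv.1, -mv.2) ∈ pvMovs := by decide

-- 'some neighbour of (a,b) is an enemy' ↔ '(a,b) is in the danger set' (moves are negation-closed)
theorem adj_eq (a b : Int) :
    (pvMovs.any (fun mv => decide ((a + mv.1, b + mv.2) ∈ ubicacionesEnemigos))) =
      PySem.Set.contains pvDanger (a, b) := by
  rw [Bool.eq_iff_iff]
  simp only [List.any_eq_true, decide_eq_true_eq, PySem.Set.contains, List.contains_eq_mem,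
    pvDanger, PySem.Set.mem_ofList, List.mem_flatMap, List.mem_map]
  constructor
  · rintro ⟨mv, hm, he⟩
    exact ⟨_, he, (-mv.1, -mv.2), neg_mem_pvMovs mv hm, by simp⟩
  · rintro ⟨e, he, m, hm, heq⟩
    refine ⟨(-m.1, -m.2), neg_mem_pvMovs m hm, ?_⟩
    have h1 : a = e.1 + m.1 := (congrArg Prod.fst heq).symm
    have h2 : b = e.2 + m.2 := (congrArg Prod.snd heq).symm
    have : (a + -m.1, b + -m.2) = e := by simp [h1, h2]
    rwa [this]

-- one iteration of A's outer loop, rewritten to B's condition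
theorem step_eq0 (acc : List (Int × Int)) (n : Int × Int) :
    (if (!(false : Bool) && !(pvMovs.foldl (fun adj mv =>
          if (n.1 + mv.1, n.2 + mv.2) ∈ ubicacionesEnemigos then true else adj) false) &&
        decide ((0 ≤ n.1 ∧ n.1 ≤ 6) ∧ (0 ≤ n.2 ∧ n.2 ≤ 6))) then acc ++ [n] else acc)
      = acc ++ (if (0 ≤ n.1 ∧ n.1 ≤ 6) ∧ (0 ≤ n.2 ∧ n.2 ≤ 6) ∧ ¬ PySem.Set.contains pvDanger n = true
          then [n] else []) := by
  rw [foldl_if_true, Bool.false_or, adj_eq n.1 n.2]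
  rw [Prod.mk.eta]
  simp only [PySem.Set.contains, List.contains_eq_mem, decide_eq_true_eq]
  by_cases hc : n ∈ pvDanger <;>
    by_cases hd : (0 ≤ n.1 ∧ n.1 ≤ 6) ∧ (0 ≤ n.2 ∧ n.2 ≤ 6) <;>
      simp [hc, hd]

-- step_eq0 with the inner foldl unfolded, as it appears after unfolding the literal move list
theorem step_eq (acc : List (Int × Int)) (a b : Int) :
    (if ((!(false : Bool) &&
          !(if (a + 0, b + 1) ∈ ubicacionesEnemigos then true
            else if (a + 0, b + -1) ∈ ubicacionesEnemigos then true
            else if (a + 1, b + 0) ∈ ubicacionesEnemigos then true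
            else if (a + -1, b + 0) ∈ ubicacionesEnemigos then true else false) &&
          decide ((0 ≤ a ∧ a ≤ 6) ∧ (0 ≤ b ∧ b ≤ 6))) = true) then acc ++ [(a, b)] else acc)
      = acc ++ (if (0 ≤ a ∧ a ≤ 6) ∧ (0 ≤ b ∧ b ≤ 6) ∧ ¬ PySem.Set.contains pvDanger (a, b) = true
          then [(a, b)] else []) := by
  have h := step_eq0 acc (a, b)
  rw [pvMovs] at h
  simp only [List.foldl_cons, List.foldl_nil] at h
  exact h

theorem actions_eq_alt (x y : Int) : actions (x, y) = actions_alt (x, y) := by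
  simp only [actions, actions_alt, pvMovs, List.foldl_cons, List.foldl_nil,
    List.filterMap_cons, List.filterMap_nil]
  simp only [step_eq]
  split_ifs <;> rfl

-- ===== VERDICT (by name: the statement is the Claim_ definition above) =====
theorem actions_spec : Claim_equal_actions := by
  rintro ⟨x, y⟩ _
  exact actions_eq_alt x y
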